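-- pv_equiv track=rewrite | github.com/CIT-GARDENs-Organization/.github | scripts/org_stats.py | group_repos_by_satellite
-- ===== SOURCE A (Python) =====
-- SATELLITE_GROUPS = {
--     "YOMOGI": ["yomogi", "YOMOGI", "ymg", "YMG"],
--     "KASHIWA": ["kashiwa", "KASHIWA", "ksh", "KSH"],
--     "SAKURA": ["sakura", "SAKURA", "skr", "SKR"],
--     "BOTAN": ["botan", "BOTAN", "btn", "BTN"],
--     "MOMIJI": ["momiji", "MOMIJI", "mmj", "MMJ"]
-- }
--
-- OTHER_GROUP = "OTHERS"
--
-- def group_repos_by_satellite(repos):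
--     grouped = {k: [] for k in SATELLITE_GROUPS.keys()}
--     grouped[OTHER_GROUP] = []
--
--     for r in repos:
--         name = r["name"]
--         lower = name.lower()
--         put = False
--         for sat, kws in SATELLITE_GROUPS.items():
--             if any(kw.lower() in lower for kw in kws):
--                 grouped[sat].append(r)
--                 put = True
--                 break
--         if not put:
--             grouped[OTHER_GROUP].append(r)
--     return grouped
-- ===== SOURCE B (Python) =====
-- SATELLITE_GROUPS = {
--     "YOMOGI": ["yomogi", "YOMOGI", "ymg", "YMG"],
--     "KASHIWA": ["kashiwa", "KASHIWA", "ksh", "KSH"],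
--     "SAKURA": ["sakura", "SAKURA", "skr", "SKR"],
--     "BOTAN": ["botan", "BOTAN", "btn", "BTN"],
--     "MOMIJI": ["momiji", "MOMIJI", "mmj", "MMJ"]
-- }
--
-- OTHER_GROUP = "OTHERS"
--
--
-- def group_repos_by_satellite(repos):
--     # Group-major sieve: each satellite filters its matches out of the
--     # still-unclaimed repos, so first-group-wins and repo order fall out
--     # of the sieve instead of a per-repo break.
--     result = {}
--     remaining = list(repos)
--     for sat, kws in SATELLITE_GROUPS.items():
--         lowered = [kw.lower() for kw in kws]
--
--         def hit(r):
--             low = r["name"].lower()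
--             return any(kw in low for kw in lowered)
--
--         result[sat] = [r for r in remaining if hit(r)]
--         remaining = [r for r in remaining if not hit(r)]
--     result[OTHER_GROUP] = remaining
--     return result
-- ===== Notes on version B (the rewrite author's own statement) =====
-- stated objective: alternative
-- what changed: B replaces A's per-repo scan over the satellite groups with first-match break by a group-major sieve: each group in order filters its matches out of the still-unclaimed repos, and what remains becomes OTHERS.
import Mathlib
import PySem

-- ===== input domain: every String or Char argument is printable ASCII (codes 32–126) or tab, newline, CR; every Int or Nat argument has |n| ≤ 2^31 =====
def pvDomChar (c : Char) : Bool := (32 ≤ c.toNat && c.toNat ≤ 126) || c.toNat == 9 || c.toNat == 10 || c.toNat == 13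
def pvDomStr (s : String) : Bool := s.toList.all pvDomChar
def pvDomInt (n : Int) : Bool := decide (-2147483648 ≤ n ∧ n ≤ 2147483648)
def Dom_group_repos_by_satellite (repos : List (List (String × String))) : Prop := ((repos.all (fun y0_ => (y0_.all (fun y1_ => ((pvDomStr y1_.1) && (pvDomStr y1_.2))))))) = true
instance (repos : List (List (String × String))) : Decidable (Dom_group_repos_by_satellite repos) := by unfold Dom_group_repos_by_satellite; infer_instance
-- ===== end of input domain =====

-- B replaces A's per-repo first-match-and-break scan of the groups by a group-major
-- sieve (each group filters its matches out of the still-unclaimed repos); objective: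
-- alternative decomposition, same cost.

-- SATELLITE_GROUPS.items(), in insertion order (shared module constant)
def pvSatItems : List (String × List String) :=
  [("YOMOGI", ["yomogi", "YOMOGI", "ymg", "YMG"]),
   ("KASHIWA", ["kashiwa", "KASHIWA", "ksh", "KSH"]),
   ("SAKURA", ["sakura", "SAKURA", "skr", "SKR"]),
   ("BOTAN", ["botan", "BOTAN", "btn", "BTN"]),
   ("MOMIJI", ["momiji", "MOMIJI", "mmj", "MMJ"])]

-- r["name"].lower(); Python raises KeyError when "name" is absent — Pre_ excludes
-- that, the total stand-in value "" is never claimed about.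
def pvNameLower (r : List (String × String)) : String :=
  PySem.Str.lower (((PySem.Dict.mk r).get? "name").getD "")

-- ===== PORT A =====
-- any(kw.lower() in lower for kw in kws)
def pvKwMatch (kws : List String) (lower : String) : Bool :=
  kws.any (fun kw => PySem.Str.isIn (PySem.Str.lower kw) lower)

-- the inner 'for sat, kws in SATELLITE_GROUPS.items(): … break' loop; returns
-- the updated dict and the 'put' flag
def pvLoopA (items : List (String × List String)) (lower : String)
    (r : List (String × String)) (grouped : PySem.Dict String (List (List (String × String)))) :
    PySem.Dict String (List (List (String × String))) × Bool :=
  match items with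
  | [] => (grouped, false)
  | (sat, kws) :: rest =>
      if pvKwMatch kws lower then (grouped.modify sat [] (· ++ [r]), true)
      else pvLoopA rest lower r grouped

-- the body of 'for r in repos' (one repo step)
def pvStepA (g : PySem.Dict String (List (List (String × String)))) (r : List (String × String)) :
    PySem.Dict String (List (List (String × String))) :=
  let lower := pvNameLower r
  let (g', put) := pvLoopA pvSatItems lower r g
  if !put then g'.modify "OTHERS" [] (· ++ [r]) else g'

def group_repos_by_satellite (repos : List (List (String × String))) :
    List (String × List (List (String × String))) :=
  -- grouped = {k: [] for k in SATELLITE_GROUPS.keys()}; grouped[OTHER_GROUP] = []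
  let grouped : PySem.Dict String (List (List (String × String))) :=
    ((pvSatItems.map (·.1)).foldl (fun d k => d.insert k []) PySem.Dict.empty).insert "OTHERS" []
  let grouped := repos.foldl pvStepA grouped
  grouped.items

-- ===== PORT B =====
-- hit(r): any(kw in r["name"].lower() for kw in lowered)
def pvHit (kws : List String) (r : List (String × String)) : Bool :=
  (kws.map PySem.Str.lower).any (fun kw => PySem.Str.isIn kw (pvNameLower r))

-- group-major sieve; the result dict's keys are all fresh and inserted in order,
-- so it is built directly as the items list
def group_repos_by_satellite_alt (repos : List (List (String × String))) :
    List (String × List (List (String × String))) :=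
  let st := pvSatItems.foldl
    (fun (acc : List (String × List (List (String × String))) × List (List (String × String))) gi =>
      (acc.1 ++ [(gi.1, acc.2.filter (fun r => pvHit gi.2 r))],
       acc.2.filter (fun r => !pvHit gi.2 r)))
    ([], repos)
  st.1 ++ [("OTHERS", st.2)]

-- ===== PRECONDITION & SPEC =====
-- Pre_: every repo dict has a "name" key (Python A raises KeyError otherwise).
def Pre_group_repos_by_satellite (repos : List (List (String × String))) : Prop :=
  ∀ r ∈ repos, ((PySem.Dict.mk r).get? "name").isSome
instance (repos : List (List (String × String))) : Decidable (Pre_group_repos_by_satellite repos) := by unfold Pre_group_repos_by_satellite; infer_instance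

def pvWitness_group_repos_by_satellite : (List (List (String × String))) :=
  [[("name", "my-YMG-repo")], [("name", "misc")], [("name", "kashiwa2")]]

def Spec_group_repos_by_satellite (repos : List (List (String × String))) (out : List (String × List (List (String × String)))) : Prop := out = group_repos_by_satellite_alt repos
instance (repos : List (List (String × String))) (out : List (String × List (List (String × String)))) : Decidable (Spec_group_repos_by_satellite repos out) := by unfold Spec_group_repos_by_satellite; infer_instance

-- ===== CLAIM (what is proved, stated in full; the proofs are below) =====
def Claim_equal_group_repos_by_satellite : Prop := ∀ (repos : List (List (String × String))), Dom_group_repos_by_satellite repos → Pre_group_repos_by_satellite repos → Spec_group_repos_by_satellite repos (group_repos_by_satellite repos)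

-- ===== LEMMAS AND PROOFS =====

-- A's any(kw.lower() in lower) and B's any over the pre-lowered list agree
theorem pvHit_eq (kws : List String) (r : List (String × String)) :
    pvHit kws r = pvKwMatch kws (pvNameLower r) := by
  simp [pvHit, pvKwMatch, List.any_map, Function.comp_def, PySem.Str.toList_lower]

-- per-bucket membership predicates, in B's sieve shape (match this group, missed all earlier)
def pvQ1 (r : List (String × String)) : Bool := pvHit ["yomogi", "YOMOGI", "ymg", "YMG"] r
def pvQ2 (r : List (String × String)) : Bool := pvHit ["kashiwa", "KASHIWA", "ksh", "KSH"] r && !pvHit ["yomogi", "YOMOGI", "ymg", "YMG"] r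
def pvQ3 (r : List (String × String)) : Bool := pvHit ["sakura", "SAKURA", "skr", "SKR"] r && (!pvHit ["kashiwa", "KASHIWA", "ksh", "KSH"] r && !pvHit ["yomogi", "YOMOGI", "ymg", "YMG"] r)
def pvQ4 (r : List (String × String)) : Bool := pvHit ["botan", "BOTAN", "btn", "BTN"] r && (!pvHit ["sakura", "SAKURA", "skr", "SKR"] r && (!pvHit ["kashiwa", "KASHIWA", "ksh", "KSH"] r && !pvHit ["yomogi", "YOMOGI", "ymg", "YMG"] r))
def pvQ5 (r : List (String × String)) : Bool := pvHit ["momiji", "MOMIJI", "mmj", "MMJ"] r && (!pvHit ["botan", "BOTAN", "btn", "BTN"] r && (!pvHit ["sakura", "SAKURA", "skr", "SKR"] r && (!pvHit ["kashiwa", "KASHIWA", "ksh", "KSH"] r && !pvHit ["yomogi", "YOMOGI", "ymg", "YMG"] r)))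
def pvQ6 (r : List (String × String)) : Bool := !pvHit ["momiji", "MOMIJI", "mmj", "MMJ"] r && (!pvHit ["botan", "BOTAN", "btn", "BTN"] r && (!pvHit ["sakura", "SAKURA", "skr", "SKR"] r && (!pvHit ["kashiwa", "KASHIWA", "ksh", "KSH"] r && !pvHit ["yomogi", "YOMOGI", "ymg", "YMG"] r)))

-- canonical form both ports are reduced to
def pvCanon (repos : List (List (String × String))) :
    List (String × List (List (String × String))) :=
  [("YOMOGI", repos.filter pvQ1), ("KASHIWA", repos.filter pvQ2),
   ("SAKURA", repos.filter pvQ3), ("BOTAN", repos.filter pvQ4),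
   ("MOMIJI", repos.filter pvQ5), ("OTHERS", repos.filter pvQ6)]

theorem alt_eq_canon (repos : List (List (String × String))) :
    group_repos_by_satellite_alt repos = pvCanon repos := by
  simp [group_repos_by_satellite_alt, pvSatItems, List.filter_filter, pvCanon]
  exact ⟨rfl, rfl, rfl, rfl, rfl, rfl⟩

theorem pvStep1 (r : List (String × String)) (a b c d e f : List (List (String × String)))
     (h1 : pvKwMatch ["yomogi", "YOMOGI", "ymg", "YMG"] (pvNameLower r) = true) :
    pvStepA (PySem.Dict.mk [("YOMOGI", a), ("KASHIWA", b), ("SAKURA", c), ("BOTAN", d), ("MOMIJI", e), ("OTHERS", f)]) r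
      = PySem.Dict.mk [("YOMOGI", a ++ [r]), ("KASHIWA", b), ("SAKURA", c), ("BOTAN", d), ("MOMIJI", e), ("OTHERS", f)] := by
  simp [pvStepA, pvLoopA, pvSatItems, PySem.Dict.modify, PySem.Dict.contains, PySem.Dict.get?, PySem.Dict.getD, PySem.Dict.insert, h1]

theorem pvStep2 (r : List (String × String)) (a b c d e f : List (List (String × String)))
    (h1 : pvKwMatch ["yomogi", "YOMOGI", "ymg", "YMG"] (pvNameLower r) = false) (h2 : pvKwMatch ["kashiwa", "KASHIWA", "ksh", "KSH"] (pvNameLower r) = true) :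
    pvStepA (PySem.Dict.mk [("YOMOGI", a), ("KASHIWA", b), ("SAKURA", c), ("BOTAN", d), ("MOMIJI", e), ("OTHERS", f)]) r
      = PySem.Dict.mk [("YOMOGI", a), ("KASHIWA", b ++ [r]), ("SAKURA", c), ("BOTAN", d), ("MOMIJI", e), ("OTHERS", f)] := by
  simp [pvStepA, pvLoopA, pvSatItems, PySem.Dict.modify, PySem.Dict.contains, PySem.Dict.get?, PySem.Dict.getD, PySem.Dict.insert, h1, h2]

theorem pvStep3 (r : List (String × String)) (a b c d e f : List (List (String × String)))
    (h1 : pvKwMatch ["yomogi", "YOMOGI", "ymg", "YMG"] (pvNameLower r) = false) (h2 : pvKwMatch ["kashiwa", "KASHIWA", "ksh", "KSH"] (pvNameLower r) = false) (h3 : pvKwMatch ["sakura", "SAKURA", "skr", "SKR"] (pvNameLower r) = true) :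
    pvStepA (PySem.Dict.mk [("YOMOGI", a), ("KASHIWA", b), ("SAKURA", c), ("BOTAN", d), ("MOMIJI", e), ("OTHERS", f)]) r
      = PySem.Dict.mk [("YOMOGI", a), ("KASHIWA", b), ("SAKURA", c ++ [r]), ("BOTAN", d), ("MOMIJI", e), ("OTHERS", f)] := by
  simp [pvStepA, pvLoopA, pvSatItems, PySem.Dict.modify, PySem.Dict.contains, PySem.Dict.get?, PySem.Dict.getD, PySem.Dict.insert, h1, h2, h3]

theorem pvStep4 (r : List (String × String)) (a b c d e f : List (List (String × String)))
    (h1 : pvKwMatch ["yomogi", "YOMOGI", "ymg", "YMG"] (pvNameLower r) = false) (h2 : pvKwMatch ["kashiwa", "KASHIWA", "ksh", "KSH"] (pvNameLower r) = false) (h3 : pvKwMatch ["sakura", "SAKURA", "skr", "SKR"] (pvNameLower r) = false) (h4 : pvKwMatch ["botan", "BOTAN", "btn", "BTN"] (pvNameLower r) = true) :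
    pvStepA (PySem.Dict.mk [("YOMOGI", a), ("KASHIWA", b), ("SAKURA", c), ("BOTAN", d), ("MOMIJI", e), ("OTHERS", f)]) r
      = PySem.Dict.mk [("YOMOGI", a), ("KASHIWA", b), ("SAKURA", c), ("BOTAN", d ++ [r]), ("MOMIJI", e), ("OTHERS", f)] := by
  simp [pvStepA, pvLoopA, pvSatItems, PySem.Dict.modify, PySem.Dict.contains, PySem.Dict.get?, PySem.Dict.getD, PySem.Dict.insert, h1, h2, h3, h4]

theorem pvStep5 (r : List (String × String)) (a b c d e f : List (List (String × String)))
    (h1 : pvKwMatch ["yomogi", "YOMOGI", "ymg", "YMG"] (pvNameLower r) = false) (h2 : pvKwMatch ["kashiwa", "KASHIWA", "ksh", "KSH"] (pvNameLower r) = false) (h3 : pvKwMatch ["sakura", "SAKURA", "skr", "SKR"] (pvNameLower r) = false) (h4 : pvKwMatch ["botan", "BOTAN", "btn", "BTN"] (pvNameLower r) = false) (h5 : pvKwMatch ["momiji", "MOMIJI", "mmj", "MMJ"] (pvNameLower r) = true) :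
    pvStepA (PySem.Dict.mk [("YOMOGI", a), ("KASHIWA", b), ("SAKURA", c), ("BOTAN", d), ("MOMIJI", e), ("OTHERS", f)]) r
      = PySem.Dict.mk [("YOMOGI", a), ("KASHIWA", b), ("SAKURA", c), ("BOTAN", d), ("MOMIJI", e ++ [r]), ("OTHERS", f)] := by
  simp [pvStepA, pvLoopA, pvSatItems, PySem.Dict.modify, PySem.Dict.contains, PySem.Dict.get?, PySem.Dict.getD, PySem.Dict.insert, h1, h2, h3, h4, h5]

theorem pvStep6 (r : List (String × String)) (a b c d e f : List (List (String × String)))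
    (h1 : pvKwMatch ["yomogi", "YOMOGI", "ymg", "YMG"] (pvNameLower r) = false) (h2 : pvKwMatch ["kashiwa", "KASHIWA", "ksh", "KSH"] (pvNameLower r) = false) (h3 : pvKwMatch ["sakura", "SAKURA", "skr", "SKR"] (pvNameLower r) = false) (h4 : pvKwMatch ["botan", "BOTAN", "btn", "BTN"] (pvNameLower r) = false) (h5 : pvKwMatch ["momiji", "MOMIJI", "mmj", "MMJ"] (pvNameLower r) = false) :
    pvStepA (PySem.Dict.mk [("YOMOGI", a), ("KASHIWA", b), ("SAKURA", c), ("BOTAN", d), ("MOMIJI", e), ("OTHERS", f)]) r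
      = PySem.Dict.mk [("YOMOGI", a), ("KASHIWA", b), ("SAKURA", c), ("BOTAN", d), ("MOMIJI", e), ("OTHERS", f ++ [r])] := by
  simp [pvStepA, pvLoopA, pvSatItems, PySem.Dict.modify, PySem.Dict.contains, PySem.Dict.get?, PySem.Dict.getD, PySem.Dict.insert, h1, h2, h3, h4, h5]

theorem a_foldl (l : List (List (String × String)))
    (a b c d e f : List (List (String × String))) :
    (l.foldl pvStepA
      (PySem.Dict.mk [("YOMOGI", a), ("KASHIWA", b), ("SAKURA", c),
                      ("BOTAN", d), ("MOMIJI", e), ("OTHERS", f)])).items =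
    [("YOMOGI", a ++ l.filter pvQ1), ("KASHIWA", b ++ l.filter pvQ2),
     ("SAKURA", c ++ l.filter pvQ3), ("BOTAN", d ++ l.filter pvQ4),
     ("MOMIJI", e ++ l.filter pvQ5), ("OTHERS", f ++ l.filter pvQ6)] := by
  induction l generalizing a b c d e f with
  | nil => simp [PySem.Dict.items]
  | cons r l ih =>
    rw [List.foldl_cons]
    cases h1 : pvKwMatch ["yomogi", "YOMOGI", "ymg", "YMG"] (pvNameLower r) <;>
    cases h2 : pvKwMatch ["kashiwa", "KASHIWA", "ksh", "KSH"] (pvNameLower r) <;>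
    cases h3 : pvKwMatch ["sakura", "SAKURA", "skr", "SKR"] (pvNameLower r) <;>
    cases h4 : pvKwMatch ["botan", "BOTAN", "btn", "BTN"] (pvNameLower r) <;>
    cases h5 : pvKwMatch ["momiji", "MOMIJI", "mmj", "MMJ"] (pvNameLower r) <;>
    · first
      | rw [pvStep1 r a b c d e f h1]
      | rw [pvStep2 r a b c d e f h1 h2]
      | rw [pvStep3 r a b c d e f h1 h2 h3]
      | rw [pvStep4 r a b c d e f h1 h2 h3 h4]
      | rw [pvStep5 r a b c d e f h1 h2 h3 h4 h5]
      | rw [pvStep6 r a b c d e f h1 h2 h3 h4 h5]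
      rw [ih]
      simp [pvQ1, pvQ2, pvQ3, pvQ4, pvQ5, pvQ6,
        pvHit_eq, h1, h2, h3, h4, h5]

-- ===== VERDICT (by name: the statement is the Claim_ definition above) =====
theorem group_repos_by_satellite_spec : Claim_equal_group_repos_by_satellite := by
  intro repos _ _
  unfold Spec_group_repos_by_satellite
  rw [alt_eq_canon]
  show (repos.foldl pvStepA _).items = _
  rw [show (((pvSatItems.map (·.1)).foldl (fun d k => d.insert k []) PySem.Dict.empty).insert "OTHERS" []
        : PySem.Dict String (List (List (String × String)))) =
      PySem.Dict.mk [("YOMOGI", []), ("KASHIWA", []), ("SAKURA", []),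
                     ("BOTAN", []), ("MOMIJI", []), ("OTHERS", [])] from rfl]
  rw [a_foldl]
  simp [pvCanon]
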